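-- pv_equiv track=rewrite | github.com/Kirikus/PythonCodeCourse2024 | obfuscation_sort/HW1_Mamedov.py | minsize
-- ===== SOURCE A (Python) =====
-- MIN_SuPP0rtFUnction2 = 32
--
-- ONE = 1
--
-- def minsize(
--         n
--         ):
--     r = 0
--     while n             >=          MIN_SuPP0rtFUnction2:
--         r   |= n                    &                                           ONE
--         n >>= 1
--     if True: return n + r
-- ===== SOURCE B (Python) =====
-- def minsize(n):
--     if n < 32:
--         return n
--     s = n.bit_length() - 5
--     return (n >> s) + (1 if n & ((1 << s) - 1) else 0)
-- ===== Notes on version B (the rewrite author's own statement) =====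
-- stated objective: faster
-- what changed: Replaces the bit-by-bit while loop (shift right, OR the low bit) with a closed form: shift count s = bit_length - 5, one shift for the top bits and one mask test for the sticky bit.
import Mathlib
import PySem

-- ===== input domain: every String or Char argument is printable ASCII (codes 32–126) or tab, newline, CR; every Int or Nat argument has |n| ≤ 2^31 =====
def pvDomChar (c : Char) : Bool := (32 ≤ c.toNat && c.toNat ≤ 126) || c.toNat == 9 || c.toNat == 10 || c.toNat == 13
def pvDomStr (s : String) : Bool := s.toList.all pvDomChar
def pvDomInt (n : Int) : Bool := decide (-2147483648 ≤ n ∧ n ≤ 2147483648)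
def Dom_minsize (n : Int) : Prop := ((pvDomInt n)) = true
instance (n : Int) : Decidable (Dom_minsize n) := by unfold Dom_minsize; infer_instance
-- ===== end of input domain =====

-- B replaces A's bit-by-bit shift/OR loop with a closed form (one shift by bit_length-5
-- plus one mask test for the sticky bit); objective: faster (constant-factor mechanism).

-- ===== PORT A =====
-- MIN_SuPP0rtFUnction2 = 32
def MIN_SuPP0rtFUnction2 : Int := 32
-- ONE = 1
def ONE : Int := 1

-- A's while loop, state (n, r): 'r |= n & ONE; n >>= 1' while n >= 32, then 'return n + r'
def minsizeLoop (n r : Int) : Int :=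
  if MIN_SuPP0rtFUnction2 ≤ n then
    minsizeLoop (n >>> (1:Nat)) (PySem.Int.bor r (PySem.Int.band n ONE))
  else n + r
termination_by n.toNat
decreasing_by
  rename_i h
  simp only [MIN_SuPP0rtFUnction2] at h
  have h0 : (0:Int) ≤ n := by omega
  obtain ⟨m, rfl⟩ := Int.eq_ofNat_of_zero_le h0
  have e : ((m:Int) >>> (1:Nat)) = ((m >>> 1 : Nat) : Int) := by simp
  rw [e]
  simp [Nat.shiftRight_eq_div_pow]
  omega

def minsize (n : Int) : Int := minsizeLoop n 0

-- ===== PORT B =====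
-- if n < 32: return n
-- s = n.bit_length() - 5
-- return (n >> s) + (1 if n & ((1 << s) - 1) else 0)
def minsize_alt (n : Int) : Int :=
  if n < 32 then n
  else
    let s : Nat := PySem.Int.bitLength n - 5
    (n >>> s) + (if PySem.Int.band n ((1 <<< s) - 1) ≠ 0 then 1 else 0)

-- ===== PRECONDITION & SPEC =====
def Spec_minsize (n : Int) (out : Int) : Prop := out = minsize_alt n
instance (n : Int) (out : Int) : Decidable (Spec_minsize n out) := by unfold Spec_minsize; infer_instance

-- ===== CLAIM (what is proved, stated in full; the proofs are below) =====
def Claim_equal_minsize : Prop := ∀ (n : Int), Dom_minsize n → Spec_minsize n (minsize n)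

-- ===== LEMMAS AND PROOFS =====

-- bit_length of a natural number, at the Nat level
def blN (m : Nat) : Nat := PySem.Int.bitLength (m : Int)

-- the common closed form both programs compute, at the Nat level
def closedN (m r : Nat) : Nat :=
  m / 2 ^ (blN m - 5) + (if r = 1 ∨ m % 2 ^ (blN m - 5) ≠ 0 then 1 else 0)

lemma blN_step (m : Nat) (h : 0 < m) : blN m = blN (m / 2) + 1 :=
  PySem.Int.bitLength_natCast h

lemma blN_lower (m : Nat) (h : 0 < m) : 2 ^ (blN m - 1) ≤ m := by
  have := PySem.Int.two_pow_bitLength_le (m:Int) (Int.natCast_ne_zero.mpr (by omega))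
  simpa [blN] using this

lemma blN_upper (m : Nat) : m < 2 ^ (blN m) := by
  have := PySem.Int.lt_two_pow_bitLength (m:Int)
  simpa [blN] using this

lemma blN_ge_six (m : Nat) (h : 32 ≤ m) : 6 ≤ blN m := by
  by_contra hc
  have h1 : 2 ^ (blN m) ≤ 2 ^ 5 := Nat.pow_le_pow_right (by norm_num) (by omega)
  have h2 := blN_upper m
  norm_num at h1
  omega

lemma blN_six (m : Nat) (h32 : 32 ≤ m) (h63 : m ≤ 63) : blN m = 6 := by
  have h6 := blN_ge_six m h32
  by_contra hc
  have h1 : 2 ^ 6 ≤ 2 ^ (blN m - 1) := Nat.pow_le_pow_right (by norm_num) (by omega)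
  have h2 := blN_lower m (by omega)
  norm_num at h1
  omega

lemma shiftR_natCast (m k : Nat) : ((m:Int) >>> k) = ((m >>> k : Nat) : Int) := by simp

-- r |= n & 1  at the Nat level, for a 0/1 accumulator
lemma bor_band (m r : Nat) (hr : r ≤ 1) :
    PySem.Int.bor (r:Int) (PySem.Int.band (m:Int) ONE) =
      ((if r = 1 ∨ m % 2 = 1 then 1 else 0 : Nat) : Int) := by
  have hband : PySem.Int.band (m:Int) ONE = ((m % 2 : Nat) : Int) := by
    simpa [ONE, Nat.and_one_is_mod] using PySem.Int.band_natCast m 1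
  rw [hband, PySem.Int.bor_natCast]
  norm_cast
  interval_cases r <;> rcases Nat.mod_two_eq_zero_or_one m with h|h <;> rw [h] <;> decide

-- one halving step preserves the closed form
lemma closed_step (m r : Nat) (hm : 32 ≤ m) (h2 : 32 ≤ m / 2) :
    closedN (m / 2) (if r = 1 ∨ m % 2 = 1 then 1 else 0) = closedN m r := by
  have hbl : blN m = blN (m / 2) + 1 := blN_step m (by omega)
  have h6 : 6 ≤ blN (m / 2) := blN_ge_six (m / 2) h2
  have hs : blN m - 5 = (blN (m / 2) - 5) + 1 := by omega
  have hdiv : m / 2 / 2 ^ (blN (m / 2) - 5) = m / 2 ^ ((blN (m / 2) - 5) + 1) := by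
    rw [Nat.div_div_eq_div_mul, ← pow_succ']
  have hmod : m % 2 ^ ((blN (m / 2) - 5) + 1) = m % 2 + 2 * (m / 2 % 2 ^ (blN (m / 2) - 5)) := by
    rw [pow_succ', Nat.mod_mul]
  unfold closedN
  rw [hs, hdiv]
  have hcond : ((if r = 1 ∨ m % 2 = 1 then (1:Nat) else 0) = 1 ∨ m / 2 % 2 ^ (blN (m / 2) - 5) ≠ 0)
      ↔ (r = 1 ∨ m % 2 ^ ((blN (m / 2) - 5) + 1) ≠ 0) := by
    rw [hmod]
    generalize m / 2 % 2 ^ (blN (m / 2) - 5) = a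
    split_ifs with h
    · rcases h with h | h <;> omega
    · have h1 : r ≠ 1 := fun hr1 => h (Or.inl hr1)
      have hm1 : m % 2 ≠ 1 := fun hx => h (Or.inr hx)
      constructor
      · rintro (hf | ha)
        · exact hf.elim
        · right; omega
      · rintro (h' | h')
        · exact (h1 h').elim
        · right; omega
  rw [if_congr hcond rfl rfl]

-- A's loop computes the closed form
lemma loop_closed : ∀ (m : Nat), ∀ (r : Nat), 32 ≤ m → r ≤ 1 →
    minsizeLoop (m:Int) (r:Int) = ((closedN m r : Nat) : Int) := by
  intro m
  induction m using Nat.strong_induction_on with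
  | _ m IH =>
    intro r h32 hr
    rw [minsizeLoop.eq_def]
    rw [if_pos (show MIN_SuPP0rtFUnction2 ≤ (m:Int) by
      simp only [MIN_SuPP0rtFUnction2]; exact_mod_cast h32)]
    rw [shiftR_natCast m 1, bor_band m r hr]
    have hsh : m >>> 1 = m / 2 := by simp [Nat.shiftRight_eq_div_pow]
    rw [hsh]
    set r' : Nat := if r = 1 ∨ m % 2 = 1 then 1 else 0 with hr'def
    have hr'le : r' ≤ 1 := by rw [hr'def]; split_ifs <;> omega
    by_cases h2 : m / 2 < 32
    · -- 32 ≤ m ≤ 63 : the loop exits after this step; bit_length is 6, shift count 1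
      rw [minsizeLoop.eq_def]
      rw [if_neg (show ¬ MIN_SuPP0rtFUnction2 ≤ ((m / 2 : Nat):Int) by
        simp only [MIN_SuPP0rtFUnction2]; exact_mod_cast not_le.mpr h2)]
      have hbl : blN m = 6 := blN_six m h32 (by omega)
      unfold closedN
      rw [hbl]
      norm_num
      rw [hr'def]
      rcases Nat.mod_two_eq_zero_or_one m with h|h <;> interval_cases r <;>
        simp [h]
    · have h2' : 32 ≤ m / 2 := by omega
      rw [IH (m / 2) (by omega) r' h2' hr'le]
      have hstep := closed_step m r h32 h2'
      rw [← hr'def] at hstep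
      exact congrArg (fun k : Nat => (k : Int)) hstep

-- B computes the closed form
lemma alt_closed (m : Nat) (hm : 32 ≤ m) :
    minsize_alt (m:Int) = ((closedN m 0 : Nat) : Int) := by
  have hnot : ¬ ((m:Int) < 32) := by exact_mod_cast not_lt.mpr hm
  simp only [minsize_alt, if_neg hnot]
  rw [show PySem.Int.bitLength (m:Int) = blN m from rfl]
  have hmask : ((1 <<< (blN m - 5) : Nat) : Int) - 1 = ((2 ^ (blN m - 5) - 1 : Nat) : Int) := by
    rw [Nat.shiftLeft_eq, one_mul]
    have h1 : 1 ≤ 2 ^ (blN m - 5) := Nat.one_le_two_pow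
    push_cast [h1]
    ring
  have hband : PySem.Int.band (m:Int) ((2 ^ (blN m - 5) - 1 : Nat) : Int)
      = ((m % 2 ^ (blN m - 5) : Nat) : Int) := by
    rw [PySem.Int.band_natCast, Nat.and_two_pow_sub_one_eq_mod]
  rw [hmask, hband, shiftR_natCast m (blN m - 5), Nat.shiftRight_eq_div_pow]
  have e3 : (if ((m % 2 ^ (blN m - 5) : Nat) : Int) ≠ 0 then (1:Int) else 0)
      = ((if (0:Nat) = 1 ∨ m % 2 ^ (blN m - 5) ≠ 0 then (1:Nat) else 0 : Nat) : Int) := by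
    by_cases hz : m % 2 ^ (blN m - 5) = 0
    · have hc0 : ((m % 2 ^ (blN m - 5) : Nat) : Int) = 0 := by rw [hz]; simp
      rw [if_neg (not_ne_iff.mpr hc0), if_neg (by simp [hz])]
      simp
    · have hz' : ((m % 2 ^ (blN m - 5) : Nat) : Int) ≠ 0 := Int.natCast_ne_zero.mpr hz
      rw [if_pos hz', if_pos (Or.inr hz)]
      simp
  rw [e3]
  unfold closedN
  rw [Nat.cast_add]

-- ===== VERDICT (by name: the statement is the Claim_ definition above) =====
theorem minsize_spec : Claim_equal_minsize := by
  intro n _hdom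
  unfold Spec_minsize
  by_cases h : n < 32
  · rw [minsize, minsize_alt, if_pos h, minsizeLoop.eq_def]
    rw [if_neg (show ¬ MIN_SuPP0rtFUnction2 ≤ n by simp only [MIN_SuPP0rtFUnction2]; omega)]
    ring
  · have h' : (32:Int) ≤ n := by omega
    obtain ⟨m, rfl⟩ := Int.eq_ofNat_of_zero_le (by omega : (0:Int) ≤ n)
    have hm : 32 ≤ m := by exact_mod_cast h'
    rw [minsize]
    have h0 : (0:Int) = ((0:Nat):Int) := by simp
    rw [h0, loop_closed m 0 hm (by omega), alt_closed m hm]
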